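-- pv_equiv track=rewrite | github.com/alecjackson27/OvertPrivilege | HW2/task3/cryptanalysisUtils.py | makeArrays
-- ===== SOURCE A (Python) =====
-- def makeArrays(length, plain):
--     index = 0
--     arrays = []
--     for i in range(length+1):
--         arrays.append([])
--
--     for letter in plain:
--         if index <= length:
--             arrays[index].append(letter)
--             index += 1
--         else:
--             arrays[0].append(letter)
--             index = 1
--     return arrays
-- ===== SOURCE B (Python) =====
-- def makeArrays(length, plain):
--     step = length + 1
--     return [[plain[j] for j in range(k, len(plain), step)] for k in range(step)]
-- ===== Notes on version B (the rewrite author's own statement) =====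
-- stated objective: simpler
-- what changed: B builds each of the length+1 buckets directly, striding over plain with range(k, len(plain), step), instead of A's single scan over plain with a counter that is incremented and reset.
import Mathlib
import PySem

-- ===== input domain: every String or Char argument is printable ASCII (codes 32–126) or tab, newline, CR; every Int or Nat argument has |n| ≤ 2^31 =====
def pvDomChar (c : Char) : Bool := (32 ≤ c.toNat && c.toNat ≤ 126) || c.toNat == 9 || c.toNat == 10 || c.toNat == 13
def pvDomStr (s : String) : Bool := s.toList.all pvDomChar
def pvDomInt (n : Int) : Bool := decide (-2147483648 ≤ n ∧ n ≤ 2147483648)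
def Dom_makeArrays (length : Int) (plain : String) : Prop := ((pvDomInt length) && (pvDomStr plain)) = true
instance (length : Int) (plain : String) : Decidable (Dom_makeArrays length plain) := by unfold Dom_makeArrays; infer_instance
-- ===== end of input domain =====

-- B fills each of the length+1 buckets directly by striding over plain with range(k, len(plain), step)
-- instead of A's single scan with a resetting counter; same cost, simpler decomposition (objective: simpler).

-- ===== PORT A =====
-- one loop-body step of A's scan: append the letter to bucket `index`, or to bucket 0 on a reset
def pvStepA (length : Int) (s : Int × List (List String)) (x : String) : Int × List (List String) :=
  if s.1 ≤ length then (s.1 + 1, s.2.modify s.1.toNat (fun b => b ++ [x]))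
  else (1, s.2.modify 0 (fun b => b ++ [x]))

def makeArrays (length : Int) (plain : String) : List (List String) :=
  let arrays := (PySem.List.pyRange 0 (length + 1) 1).foldl
    (fun a _ => a ++ [([] : List String)]) []
  (plain.toList.foldl (fun s letter => pvStepA length s (String.ofList [letter]))
    ((0 : Int), arrays)).2

-- ===== PORT B =====
def makeArrays_alt (length : Int) (plain : String) : List (List String) :=
  let step := length + 1
  (PySem.List.pyRange 0 step 1).map (fun k =>
    (PySem.List.pyRange k (PySem.Str.len plain) step).map (fun j =>
      match PySem.Str.pyGet? plain j with
      | some c => String.ofList [c]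
      | none => ""))   -- none is unreachable: j ranges over valid indices of plain

-- ===== PRECONDITION & SPEC =====
-- Pre_ excludes exactly A's crash: with length < 0 there are no buckets, so A's first append
-- raises IndexError whenever plain is non-empty.
def Pre_makeArrays (length : Int) (plain : String) : Prop := 0 ≤ length ∨ plain = ""
instance (length : Int) (plain : String) : Decidable (Pre_makeArrays length plain) := by
  unfold Pre_makeArrays; infer_instance

def pvWitness_makeArrays : Int × String := (2, "abcde")

def Spec_makeArrays (length : Int) (plain : String) (out : List (List String)) : Prop :=
  out = makeArrays_alt length plain
instance (length : Int) (plain : String) (out : List (List String)) :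
    Decidable (Spec_makeArrays length plain out) := by unfold Spec_makeArrays; infer_instance

-- ===== CLAIM (what is proved, stated in full; the proofs are below) =====
def Claim_equal_makeArrays : Prop := ∀ (length : Int) (plain : String),
  Dom_makeArrays length plain → Pre_makeArrays length plain →
  Spec_makeArrays length plain (makeArrays length plain)

-- ===== LEMMAS AND PROOFS =====

-- canonical bucket k: the letters of l at positions ≡ k (mod st)
def pvBk (st k : Nat) (l : List Char) : List String :=
  ((List.range l.length).filter (fun j => j % st = k)).map (fun j => String.ofList [l.getD j ' '])

def pvIdx (st n : Nat) : Int := if n = 0 then 0 else ((n - 1) % st + 1 : Nat)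

lemma pvBk_append (st k : Nat) (l : List Char) (c : Char) :
    pvBk st k (l ++ [c]) =
      pvBk st k l ++ (if l.length % st = k then [String.ofList [c]] else []) := by
  unfold pvBk
  rw [List.length_append, List.length_cons, List.length_nil, List.range_succ,
      List.filter_append, List.map_append]
  congr 1
  · apply List.map_congr_left
    intro j hj
    have hjn : j < l.length := List.mem_range.mp (List.mem_of_mem_filter hj)
    rw [List.getD_append _ _ _ _ hjn]
  · by_cases hc : l.length % st = k <;> simp [hc]

lemma pv_modify_map_range {α : Type} (st i : Nat) (g : Nat → α) (f : α → α) :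
    ((List.range st).map g).modify i f
      = (List.range st).map (fun k => if k = i then f (g k) else g k) := by
  apply List.ext_getElem (by simp)
  intro j h1 h2
  simp only [List.getElem_modify, List.getElem_map, List.getElem_range]
  by_cases h : i = j
  · simp [h]
  · simp [h]
    intro hji; exact absurd hji.symm h

lemma pv_pyRange_filter (st k n : Nat) (h1 : 0 < st) (hk : k < st) :
    PySem.List.pyRange (k : Int) (n : Int) (st : Int)
      = List.map (fun j : Nat => (j : Int)) ((List.range n).filter (fun j => j % st = k)) := by
  have hpos : (0 : Int) < (st : Int) := by exact_mod_cast h1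
  have pw1 : (PySem.List.pyRange (k : Int) (n : Int) (st : Int)).Pairwise (· < ·) := by
    rw [PySem.List.pyRange_of_pos _ _ hpos, List.pairwise_map]
    refine List.pairwise_lt_range.imp ?_
    intro a b hab
    have : (st : Int) * a < st * b :=
      mul_lt_mul_of_pos_left (by exact_mod_cast hab) hpos
    omega
  have pw2 : (List.map (fun j : Nat => (j : Int))
      ((List.range n).filter (fun j => j % st = k))).Pairwise (· < ·) := by
    rw [List.pairwise_map]
    exact (List.pairwise_lt_range.filter _).imp (fun hab => by exact_mod_cast hab)
  have nd1 := pw1.imp (fun h => ne_of_lt h)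
  have nd2 := pw2.imp (fun h => ne_of_lt h)
  refine List.Perm.eq_of_pairwise (fun a b _ _ hab hba => by omega) pw1 pw2
    ((List.perm_ext_iff_of_nodup nd1 nd2).mpr ?_)
  intro x
  rw [PySem.List.mem_pyRange_iff_of_pos hpos]
  simp only [List.mem_map, List.mem_filter, List.mem_range, decide_eq_true_eq]
  constructor
  · rintro ⟨hkx, hxn, q, hq⟩
    have hq0 : 0 ≤ q := by
      by_contra hneg
      have : (st : Int) * q ≤ st * (-1) :=
        mul_le_mul_of_nonneg_left (by omega) (by omega)
      omega
    rw [← Int.toNat_of_nonneg hq0] at hq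
    have hq2 : x = ((k + st * q.toNat : Nat) : Int) := by push_cast; omega
    refine ⟨k + st * q.toNat, ⟨?_, ?_⟩, hq2.symm⟩
    · exact_mod_cast hq2 ▸ hxn
    · rw [Nat.add_comm, Nat.mul_add_mod, Nat.mod_eq_of_lt hk]
  · rintro ⟨j, ⟨hjn, hjk⟩, rfl⟩
    have hkj : k ≤ j := hjk ▸ Nat.mod_le j st
    have hdm : st * (j / st) + k = j := by
      conv_rhs => rw [← Nat.div_add_mod j st, hjk]
    refine ⟨by exact_mod_cast hkj, by exact_mod_cast hjn, ⟨((j / st : Nat) : Int), ?_⟩⟩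
    have : ((st * (j / st) + k : Nat) : Int) = (j : Int) := by exact_mod_cast hdm
    push_cast at this
    omega

lemma pv_harr (st : Nat) (l : List Char) (c : Char) :
    ((List.range st).map (fun k => pvBk st k l)).modify (l.length % st)
        (fun b => b ++ [String.ofList [c]])
      = (List.range st).map (fun k => pvBk st k (l ++ [c])) := by
  rw [pv_modify_map_range st _]
  apply List.map_congr_left
  intro k _
  rw [pvBk_append]
  by_cases hkb : k = l.length % st
  · rw [if_pos hkb, if_pos hkb.symm]
  · rw [if_neg hkb, if_neg (fun hh => hkb hh.symm), List.append_nil]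

lemma pv_step_canon (length : Int) (h : 0 ≤ length) (l : List Char) (c : Char) :
    pvStepA length
        (pvIdx (length + 1).toNat l.length,
         (List.range (length + 1).toNat).map (fun k => pvBk (length + 1).toNat k l))
        (String.ofList [c])
      = (pvIdx (length + 1).toNat (l.length + 1),
         (List.range (length + 1).toNat).map (fun k => pvBk (length + 1).toNat k (l ++ [c]))) := by
  set st := (length + 1).toNat with hstdef
  have hstpos : 0 < st := by omega
  have hstI : (st : Int) = length + 1 := by omega
  rcases Nat.eq_zero_or_pos l.length with hn0 | hnpos
  · have hmod0 : l.length % st = 0 := by rw [hn0]; exact Nat.zero_mod st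
    have hidx0 : pvIdx st l.length = 0 := by rw [hn0]; simp [pvIdx]
    have hidx1 : pvIdx st (l.length + 1) = 1 := by rw [hn0]; simp [pvIdx]
    rw [hidx0, hidx1]
    unfold pvStepA
    rw [if_pos h]
    congr 1
    rw [show ((0 : Int).toNat) = l.length % st from by rw [hmod0]; rfl]
    exact pv_harr st l c
  · obtain ⟨m, hm⟩ : ∃ m, l.length = m + 1 := ⟨l.length - 1, by omega⟩
    have hr : m % st < st := Nat.mod_lt _ hstpos
    have hdm := Nat.div_add_mod m st
    have hmod : (m + 1) % st = if m % st + 1 = st then 0 else m % st + 1 := by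
      by_cases hcase : m % st + 1 = st
      · rw [if_pos hcase]
        have hms : m + 1 = st * (m / st + 1) := by rw [Nat.mul_add, Nat.mul_one]; omega
        rw [hms, Nat.mul_mod_right]
      · rw [if_neg hcase]
        have hms : m + 1 = (m % st + 1) + st * (m / st) := by omega
        rw [hms, Nat.add_mul_mod_self_left, Nat.mod_eq_of_lt (by omega)]
    have hidx : pvIdx st l.length = ((m % st + 1 : Nat) : Int) := by
      rw [hm]; simp [pvIdx]
    rw [hidx]
    unfold pvStepA
    by_cases hcase : m % st + 1 = st
    · rw [if_neg (by push_cast; omega)]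
      congr 1
      · rw [hm]
        simp only [pvIdx, if_neg (Nat.succ_ne_zero (m + 1))]
        rw [Nat.add_sub_cancel, hmod, if_pos hcase]
        norm_num
      · rw [show (0 : Nat) = l.length % st from by rw [hm, hmod, if_pos hcase]]
        exact pv_harr st l c
    · rw [if_pos (by push_cast; omega)]
      congr 1
      · rw [hm]
        simp only [pvIdx, if_neg (Nat.succ_ne_zero (m + 1))]
        rw [Nat.add_sub_cancel, hmod, if_neg hcase]
        push_cast; ring
      · rw [show (((m % st + 1 : Nat) : Int)).toNat = l.length % st from by
            rw [hm, hmod, if_neg hcase]; omega]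
        exact pv_harr st l c

lemma pv_foldA_canon (length : Int) (h : 0 ≤ length) (l : List Char) :
    l.foldl (fun s letter => pvStepA length s (String.ofList [letter]))
        ((0 : Int), (List.range (length + 1).toNat).map (fun _ => ([] : List String)))
      = (pvIdx (length + 1).toNat l.length,
         (List.range (length + 1).toNat).map (fun k => pvBk (length + 1).toNat k l)) := by
  induction l using List.reverseRecOn with
  | nil => simp [pvIdx, pvBk]
  | append_singleton l c ih =>
      rw [List.foldl_append, ih]
      simp only [List.foldl_cons, List.foldl_nil]
      rw [pv_step_canon length h l c]
      simp [List.length_append]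

lemma pv_alt_bucket (length : Int) (h : 0 ≤ length) (plain : String) (k : Nat)
    (hk : k < (length + 1).toNat) :
    (PySem.List.pyRange (k : Int) (PySem.Str.len plain) (length + 1)).map
        (fun j => match PySem.Str.pyGet? plain j with
          | some c => String.ofList [c]
          | none => "")
      = pvBk (length + 1).toNat k plain.toList := by
  have hstI : (((length + 1).toNat : Nat) : Int) = length + 1 := by omega
  rw [PySem.Str.len_eq, ← hstI,
      pv_pyRange_filter (length + 1).toNat k plain.toList.length (by omega) hk,
      List.map_map]
  unfold pvBk
  apply List.map_congr_left
  intro j hj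
  have hjn : j < plain.toList.length := List.mem_range.mp (List.mem_of_mem_filter hj)
  simp only [Function.comp_apply]
  rw [PySem.Str.pyGet?_natCast, List.getElem?_eq_getElem hjn]
  simp [List.getD_eq_getElem?_getD, List.getElem?_eq_getElem hjn]

-- ===== VERDICT (by name: the statement is the Claim_ definition above) =====
theorem makeArrays_spec : Claim_equal_makeArrays := by
  intro length plain _ hPre
  unfold Pre_makeArrays at hPre
  unfold Spec_makeArrays
  by_cases h : 0 ≤ length
  · unfold makeArrays makeArrays_alt
    have hstI : (((length + 1).toNat : Nat) : Int) = length + 1 := by omega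
    simp only [PySem.List.foldl_append_singleton_eq_map, List.nil_append]
    rw [← hstI, PySem.List.pyRange_zero_natCast ((length + 1).toNat)]
    simp only [List.map_map, Function.comp_def]
    rw [pv_foldA_canon length h plain.toList]
    symm
    apply List.map_congr_left
    intro k hk
    rw [hstI, pv_alt_bucket length h plain k (List.mem_range.mp hk)]
  · have hpl : plain = "" := hPre.resolve_left h
    subst hpl
    have hnil : PySem.List.pyRange 0 (length + 1) 1 = [] :=
      PySem.List.pyRange_one_eq_nil (by omega)
    unfold makeArrays makeArrays_alt
    simp [hnil]
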